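-- pv_equiv track=rewrite | github.com/7shi/llm7shi | llm7shi/monitor.py | _check_quasi_repetition
-- ===== SOURCE A (Python) =====
-- def _check_quasi_repetition(text: str, pattern: str, required_reps: int) -> bool:
--     """Check if text ends with pattern repeating with valid gaps.
--
--     A pattern is considered repeating if it appears multiple times at the end
--     of the text, with gaps between occurrences that are shorter than the pattern
--     itself. This allows detection of quasi-repetition like "foo1foo2foo3..."
--     where gaps ("1", "2", "3") are shorter than the pattern ("foo").
--
--     Args:
--         text: Text to check
--         pattern: The pattern to look for
--         required_reps: Minimum number of pattern occurrences needed
--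
--     Returns:
--         bool: True if quasi-repetition detected, False otherwise
--     """
--     pattern_len = len(pattern)
--     if not pattern_len:
--         return False
--     text_len = len(text)
--
--     # Must end with pattern
--     if not text.endswith(pattern):
--         return False
--
--     # Quick check: exact repetition (fastest path)
--     if text.endswith(pattern * required_reps):
--         return True
--
--     # Scan backward for quasi-repetition using rfind()
--     reps = 1
--     pos = text_len - pattern_len
--
--     while reps < required_reps and pos > 0:
--         # Use rfind to find the previous occurrence of the pattern
--         prev_pos = text.rfind(pattern, 0, pos)
--
--         if prev_pos == -1:
--             # No more occurrences found
--             break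
--
--         # Calculate the gap between the current and previous pattern
--         gap_len = pos - (prev_pos + pattern_len)
--
--         # The gap must be shorter than the pattern itself
--         if gap_len >= pattern_len:
--             # Invalid gap, repetition chain is broken
--             break
--
--         # Valid quasi-repetition found, continue searching from the new position
--         reps += 1
--         pos = prev_pos
--
--     return reps >= required_reps
-- ===== SOURCE B (Python) =====
-- def _check_quasi_repetition(text: str, pattern: str, required_reps: int) -> bool:
--     """Forward dynamic programming: scan text once left to right; for each
--     pattern occurrence compute the length of the quasi-repetition chain ending
--     there (predecessor = rightmost occurrence ending at or before this one,
--     linked only when the gap is shorter than the pattern), then test the chain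
--     length at the final occurrence."""
--     m = len(pattern)
--     if not m:
--         return False
--     if not text.endswith(pattern):
--         return False
--
--     occs = []     # occurrence start indices, ascending (overlaps included)
--     chains = []   # chains[k] = chain length ending at occs[k]
--     j = 0         # two-pointer: occs[0:j] are the starts <= i - m
--     last = 0      # chain length at the most recent occurrence
--     i = text.find(pattern)
--     while i != -1:
--         while j < len(occs) and occs[j] <= i - m:
--             j += 1
--         if j > 0 and i - (occs[j - 1] + m) < m:
--             last = chains[j - 1] + 1
--         else:
--             last = 1
--         occs.append(i)
--         chains.append(last)
--         i = text.find(pattern, i + 1)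
--     return last >= required_reps
-- ===== Notes on version B (the rewrite author's own statement) =====
-- stated objective: alternative
-- what changed: B replaces A's backward greedy walk (repeated rfind from the end, capped at required_reps) with a single left-to-right dynamic-programming pass: it visits every occurrence once in text order, maintains a two-pointer predecessor index, computes the quasi-repetition chain length ending at each occurrence, and finally tests the chain length at the last occurrence; A's exact-repetition quick path is dropped.
import Mathlib
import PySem

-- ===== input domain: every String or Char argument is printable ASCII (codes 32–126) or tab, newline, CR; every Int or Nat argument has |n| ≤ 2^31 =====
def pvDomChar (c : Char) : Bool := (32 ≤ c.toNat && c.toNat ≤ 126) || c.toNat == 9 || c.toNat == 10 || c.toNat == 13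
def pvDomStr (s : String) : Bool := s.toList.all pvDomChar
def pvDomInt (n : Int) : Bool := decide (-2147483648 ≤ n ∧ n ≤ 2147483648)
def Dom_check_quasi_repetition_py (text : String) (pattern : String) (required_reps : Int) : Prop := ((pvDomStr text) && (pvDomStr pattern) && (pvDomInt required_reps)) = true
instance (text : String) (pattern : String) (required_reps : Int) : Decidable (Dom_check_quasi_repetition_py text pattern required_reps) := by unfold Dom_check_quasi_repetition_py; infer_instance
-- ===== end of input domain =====

-- B replaces A's backward greedy rfind walk (with its exact-repetition quick path) by a single
-- forward dynamic-programming pass: chain lengths at every occurrence, two-pointer predecessor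
-- (alternative decomposition; same return value on every input).


-- ===== PORT A =====
-- A's backward while-loop; fuel = (required_reps - reps).toNat bounds the iteration count
-- exactly (each pass increments reps and requires reps < required_reps), so the fuel guard
-- never fires on the path the Python takes.
def pvLoopA (t p : List Char) (required_reps : Int) : Int → Int → Nat → Int
  | reps, _pos, 0 => reps
  | reps, pos, fuel+1 =>
    if reps < required_reps ∧ 0 < pos then
      let prev_pos := PySem.Chars.rfindFrom t p 0 (some pos)
      if prev_pos = -1 then reps
      else
        let gap_len := pos - (prev_pos + (p.length : Int))
        if (p.length : Int) ≤ gap_len then reps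
        else pvLoopA t p required_reps (reps + 1) prev_pos fuel
    else reps

def check_quasi_repetition_py (text : String) (pattern : String) (required_reps : Int) : Bool :=
  let t := text.toList
  let p := pattern.toList
  let pattern_len : Int := p.length
  if pattern_len = 0 then false
  else
    let text_len : Int := t.length
    if ¬ (PySem.Chars.endswith t p = true) then false
    else if PySem.Chars.endswith t (PySem.List.pyRepeat p required_reps) then true
    else
      let reps := pvLoopA t p required_reps 1 (text_len - pattern_len) (required_reps - 1).toNat
      decide (required_reps ≤ reps)

-- ===== PORT B =====
-- B's inner pointer-advance loop: while j < len(occs) and occs[j] <= lim: j += 1.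
-- fuel = len(occs)+1 bounds it (j strictly increases and stays ≤ len(occs)).
def pvAdvance (occs : List Int) (lim : Int) : Nat → Nat → Nat
  | j, 0 => j
  | j, fuel+1 =>
    if j < occs.length ∧ occs.getD j 0 ≤ lim then pvAdvance occs lim (j+1) fuel else j

-- B's main forward loop over the occurrences found by text.find(pattern, i+1);
-- fuel = len(text)+1 bounds it (the search start strictly increases and stays ≤ len(text)).
def pvLoopB (t p : List Char) (m : Int) : Int → List Int → List Int → Nat → Int → Nat → Int
  | _i, _occs, _chains, _j, last, 0 => last
  | i, occs, chains, j, last, fuel+1 =>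
    if i = -1 then last
    else
      let j' := pvAdvance occs (i - m) j (occs.length + 1)
      let c := if 0 < j' ∧ i - (occs.getD (j' - 1) 0 + m) < m then chains.getD (j' - 1) 0 + 1 else 1
      pvLoopB t p m (PySem.Chars.findFrom t p (i + 1) none) (occs ++ [i]) (chains ++ [c]) j' c fuel

def check_quasi_repetition_py_alt (text : String) (pattern : String) (required_reps : Int) : Bool :=
  let t := text.toList
  let p := pattern.toList
  let m : Int := p.length
  if m = 0 then false
  else if ¬ (PySem.Chars.endswith t p = true) then false
  else
    let last := pvLoopB t p m (PySem.Chars.find t p) [] [] 0 0 (t.length + 1)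
    decide (required_reps ≤ last)

-- ===== PRECONDITION & SPEC =====
def Spec_check_quasi_repetition_py (text : String) (pattern : String) (required_reps : Int) (out : Bool) : Prop := out = check_quasi_repetition_py_alt text pattern required_reps
instance (text : String) (pattern : String) (required_reps : Int) (out : Bool) : Decidable (Spec_check_quasi_repetition_py text pattern required_reps out) := by unfold Spec_check_quasi_repetition_py; infer_instance

-- ===== CLAIM (what is proved, stated in full; the proofs are below) =====
def Claim_equal_check_quasi_repetition_py : Prop := ∀ (text : String) (pattern : String) (required_reps : Int), Dom_check_quasi_repetition_py text pattern required_reps → Spec_check_quasi_repetition_py text pattern required_reps (check_quasi_repetition_py text pattern required_reps)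

-- ===== LEMMAS AND PROOFS =====

-- the semantic backbone shared by both proofs: the greedy chain length starting at pos
-- (predecessor = text.rfind(pattern, 0, pos), linked when the gap is < len(pattern))
def pvChain (t p : List Char) : Nat → Int → Int
  | 0, _pos => 1
  | f+1, pos =>
    let prev := PySem.Chars.rfindFrom t p 0 (some pos)
    if prev = -1 then 1
    else if (p.length : Int) ≤ pos - (prev + (p.length : Int)) then 1
    else 1 + pvChain t p f prev

lemma pvChain_ge_one (t p : List Char) : ∀ (f : Nat) (pos : Int), 1 ≤ pvChain t p f pos := by
  intro f
  induction f with
  | zero => intro pos; rw [pvChain]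
  | succ f ih =>
    intro pos
    rw [pvChain]
    split_ifs with h1 h2
    · omega
    · omega
    · have := ih (PySem.Chars.rfindFrom t p 0 (some pos)); omega

-- an occurrence of a nonempty pattern forces its index strictly inside the text
lemma pvOcc_lt_length {t p : List Char} {j : Nat} (hp : p ≠ []) (h : p <+: t.drop j) :
    j < t.length := by
  by_contra hle
  have : t.drop j = [] := List.drop_eq_nil_iff.mpr (by omega)
  rw [this] at h
  exact hp (List.prefix_nil.mp h)

-- an occurrence fits entirely inside the text
lemma pvOcc_add_le {t p : List Char} {j : Nat} (hp : p ≠ []) (h : p <+: t.drop j) :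
    j + p.length ≤ t.length := by
  have h1 := pvOcc_lt_length hp h
  have := h.length_le
  rw [List.length_drop] at this
  omega

-- rfind.go returns the greatest hit index ≤ j, else -1
lemma pvRfindGo_spec (s sub : List Char) : ∀ j : Nat,
    ((∀ i : Nat, i ≤ j → ¬ sub <+: s.drop i) ∧ PySem.Chars.rfind.go s sub j = -1)
    ∨ (∃ i : Nat, i ≤ j ∧ sub <+: s.drop i ∧ (∀ i' : Nat, i < i' → i' ≤ j → ¬ sub <+: s.drop i')
        ∧ PySem.Chars.rfind.go s sub j = i) := by
  intro j
  induction j with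
  | zero =>
    by_cases h : sub.isPrefixOf s
    · right
      exact ⟨0, le_refl _, by simpa using List.isPrefixOf_iff_prefix.mp h, by omega,
        by simp [PySem.Chars.rfind.go, h]⟩
    · left
      refine ⟨?_, by simp [PySem.Chars.rfind.go, h]⟩
      intro i hi
      interval_cases i
      simpa using fun hc => h (List.isPrefixOf_iff_prefix.mpr hc)
  | succ j ih =>
    have heq : PySem.Chars.rfind.go s sub (j+1)
        = if sub.isPrefixOf (s.drop (j+1)) then ((j:Int)+1) else PySem.Chars.rfind.go s sub j := by
      rw [PySem.Chars.rfind.go]; push_cast; ring_nf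
    by_cases h : sub.isPrefixOf (s.drop (j+1))
    · right
      exact ⟨j+1, le_refl _, List.isPrefixOf_iff_prefix.mp h, by omega,
        by rw [heq, if_pos h]; push_cast; ring⟩
    · have hnp : ¬ sub <+: s.drop (j+1) := fun hc => h (List.isPrefixOf_iff_prefix.mpr hc)
      rcases ih with ⟨hall, hval⟩ | ⟨i, hij, hpre, hmax, hval⟩
      · left
        refine ⟨?_, by rw [heq, if_neg h]; exact hval⟩
        intro i hi
        rcases Nat.lt_succ_iff_lt_or_eq.mp (Nat.lt_succ_of_le hi) with h' | h'
        · exact hall i (by omega)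
        · subst h'; exact hnp
      · right
        refine ⟨i, by omega, hpre, ?_, by rw [heq, if_neg h]; exact hval⟩
        intro i' hlt hle
        rcases Nat.lt_succ_iff_lt_or_eq.mp (Nat.lt_succ_of_le hle) with h' | h'
        · exact hmax i' hlt (by omega)
        · subst h'; exact hnp

-- text.rfind(pattern, 0, pos) for 0 ≤ pos ≤ len(text): greatest start fitting before pos
lemma pvRfindFrom_spec (t p : List Char) (pos : Int) (hp : p ≠ [])
    (h1 : 0 ≤ pos) (h2 : pos ≤ (t.length : Int)) :
    (PySem.Chars.rfindFrom t p 0 (some pos) = -1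
        ∧ ∀ jn : Nat, (jn : Int) + p.length ≤ pos → ¬ p <+: t.drop jn)
    ∨ (∃ jn : Nat, PySem.Chars.rfindFrom t p 0 (some pos) = jn
        ∧ (jn : Int) + p.length ≤ pos ∧ p <+: t.drop jn
        ∧ ∀ i : Nat, (i : Int) + p.length ≤ pos → p <+: t.drop i → i ≤ jn) := by
  have hm : 1 ≤ p.length := List.length_pos_iff.mpr hp
  have hred : PySem.Chars.rfindFrom t p 0 (some pos)
      = (if PySem.Chars.rfind (List.take pos.toNat t) p = -1 then -1
         else PySem.Chars.rfind (List.take pos.toNat t) p) := by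
    rw [PySem.Chars.rfindFrom]
    simp only []
    rw [if_neg (by omega : ¬ (t.length:Int) < pos), if_neg (by omega : ¬ pos < 0),
        if_neg (by omega : ¬ (0:Int) < 0), if_neg (by omega : ¬ pos < 0)]
    simp
  set u := List.take pos.toNat t with hu
  have hlen : u.length = pos.toNat := by
    rw [hu, List.length_take]; omega
  -- prefix translation
  have htrans : ∀ i : Nat, (p <+: u.drop i ↔ (p <+: t.drop i ∧ i + p.length ≤ pos.toNat)) := by
    intro i
    rw [hu, List.drop_take, List.prefix_take_iff]
    constructor
    · rintro ⟨ha, hb⟩; exact ⟨ha, by omega⟩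
    · rintro ⟨ha, hb⟩; exact ⟨ha, by omega⟩
  have hgo : PySem.Chars.rfind u p = PySem.Chars.rfind.go u p u.length := rfl
  rcases pvRfindGo_spec u p u.length with ⟨hall, hval⟩ | ⟨i, hij, hpre, hmax, hval⟩
  · left
    constructor
    · rw [hred, hgo, hval]; simp
    · intro jn hjn hc
      have hj2 : jn ≤ u.length := by omega
      exact hall jn hj2 ((htrans jn).mpr ⟨hc, by omega⟩)
  · right
    obtain ⟨hpre', hposle⟩ := (htrans i).mp hpre
    refine ⟨i, ?_, by omega, hpre', ?_⟩
    · rw [hred, hgo, hval]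
      rw [if_neg (by omega : ¬ ((i:Int) = -1))]
    · intro i' hle' hpre''
      by_contra hgt
      exact hmax i' (by omega) (by omega) ((htrans i').mpr ⟨hpre'', by omega⟩)

-- rfind over an empty window finds nothing
lemma pvPred_zero (t p : List Char) (hp : p ≠ []) :
    PySem.Chars.rfindFrom t p 0 (some 0) = -1 := by
  rcases pvRfindFrom_spec t p 0 hp (by omega) (by positivity) with ⟨hv, _⟩ | ⟨jn, _, hfit, _, _⟩
  · exact hv
  · have hm : 1 ≤ p.length := List.length_pos_iff.mpr hp
    omega

-- the chain length does not depend on the fuel once it dominates pos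
lemma pvChain_stable (t p : List Char) (hp : p ≠ []) :
    ∀ (k : Nat) (pos : Int) (f1 f2 : Nat), 0 ≤ pos → pos ≤ (t.length : Int) →
    pos.toNat ≤ k → pos.toNat ≤ f1 → pos.toNat ≤ f2 →
    pvChain t p f1 pos = pvChain t p f2 pos := by
  intro k
  induction k with
  | zero =>
    intro pos f1 f2 h0 _hn hk _ _
    have hpos : pos = 0 := by omega
    subst hpos
    have hval : ∀ f : Nat, pvChain t p f 0 = 1 := by
      intro f
      cases f with
      | zero => rw [pvChain]
      | succ f => rw [pvChain]; simp [pvPred_zero t p hp]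
    rw [hval, hval]
  | succ k ih =>
    intro pos f1 f2 h0 hn hk hf1 hf2
    by_cases hsm : pos.toNat ≤ k
    · exact ih pos f1 f2 h0 hn hsm (by omega) (by omega)
    · have hpos : pos.toNat = k + 1 := by omega
      obtain ⟨g1, rfl⟩ : ∃ g1, f1 = g1 + 1 := ⟨f1 - 1, by omega⟩
      obtain ⟨g2, rfl⟩ : ∃ g2, f2 = g2 + 1 := ⟨f2 - 1, by omega⟩
      rw [pvChain, pvChain]
      rcases pvRfindFrom_spec t p pos hp h0 hn with ⟨hv, _⟩ | ⟨jn, hv, hfit, hpre, _⟩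
      · rw [hv]; simp
      · rw [hv]
        have hm : 1 ≤ p.length := List.length_pos_iff.mpr hp
        have hne : ¬ ((jn : Int) = -1) := by omega
        rw [if_neg hne, if_neg hne]
        by_cases hgap : (p.length : Int) ≤ pos - ((jn : Int) + p.length)
        · rw [if_pos hgap, if_pos hgap]
        · rw [if_neg hgap, if_neg hgap]
          have : pvChain t p g1 (jn : Int) = pvChain t p g2 (jn : Int) :=
            ih (jn : Int) g1 g2 (by omega) (by omega) (by omega) (by omega) (by omega)
          omega

-- A's loop reaches required_reps iff the chain from pos does
lemma pvLoopA_char (t p : List Char) (r : Int) (hp : p ≠ []) :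
    ∀ (fuel : Nat) (reps pos : Int), 1 ≤ reps → 0 ≤ pos → pos ≤ (t.length : Int) →
    (r - reps).toNat ≤ fuel →
    (r ≤ pvLoopA t p r reps pos fuel ↔ r ≤ reps - 1 + pvChain t p pos.toNat pos) := by
  intro fuel
  induction fuel with
  | zero =>
    intro reps pos h1 h0 hn hf
    have hc := pvChain_ge_one t p pos.toNat pos
    rw [pvLoopA]
    omega
  | succ fuel ih =>
    intro reps pos h1 h0 hn hf
    have hm : 1 ≤ p.length := List.length_pos_iff.mpr hp
    by_cases hr : reps < r
    · by_cases hpp : 0 < pos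
      · obtain ⟨k, hk⟩ : ∃ k, pos.toNat = k + 1 := ⟨pos.toNat - 1, by omega⟩
        rw [pvLoopA, if_pos ⟨hr, hpp⟩, hk, pvChain]
        simp only []
        rcases pvRfindFrom_spec t p pos hp h0 hn with ⟨hv, _⟩ | ⟨jn, hv, hfit, hpre, _⟩
        · rw [hv, if_pos rfl, if_pos rfl]
          omega
        · rw [hv, if_neg (by omega : ¬ ((jn : Int) = -1)),
              if_neg (by omega : ¬ ((jn : Int) = -1))]
          by_cases hgap : (p.length : Int) ≤ pos - ((jn : Int) + p.length)
          · rw [if_pos hgap, if_pos hgap]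
            omega
          · rw [if_neg hgap, if_neg hgap]
            have hrec := ih (reps + 1) (jn : Int) (by omega) (by omega) (by omega) (by omega)
            have hstab : pvChain t p k (jn : Int) = pvChain t p (jn : Int).toNat (jn : Int) :=
              pvChain_stable t p hp (max k (jn : Int).toNat) (jn : Int) k (jn : Int).toNat
                (by omega) (by omega) (by omega) (by omega) (by omega)
            rw [hstab]
            omega
      · have hpos : pos = 0 := by omega
        subst hpos
        rw [pvLoopA, if_neg (by omega : ¬ (reps < r ∧ (0:Int) < 0))]
        rw [show ((0:Int)).toNat = 0 from rfl, pvChain]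
        omega
    · rw [pvLoopA, if_neg (fun h => hr h.1)]
      have hc := pvChain_ge_one t p pos.toNat pos
      omega

-- elements of a strictly ascending list are ordered by index
lemma pvSorted_getD_le {occs : List Int} (hs : occs.Pairwise (· < ·)) {k1 k2 : Nat}
    (h12 : k1 ≤ k2) (h2 : k2 < occs.length) : occs.getD k1 0 ≤ occs.getD k2 0 := by
  rcases Nat.lt_or_ge k1 k2 with h | h
  · rw [List.getD_eq_getElem _ _ (by omega), List.getD_eq_getElem _ _ h2]
    exact le_of_lt (List.pairwise_iff_getElem.mp hs k1 k2 (by omega) h2 h)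
  · have : k1 = k2 := by omega
    subst this; rfl

-- B's pointer-advance loop: result bounds and the stop condition
lemma pvAdvance_spec (occs : List Int) (lim : Int) :
    ∀ (fuel j : Nat), j ≤ occs.length → occs.length - j ≤ fuel →
    j ≤ pvAdvance occs lim j fuel ∧ pvAdvance occs lim j fuel ≤ occs.length
    ∧ (∀ k, j ≤ k → k < pvAdvance occs lim j fuel → occs.getD k 0 ≤ lim)
    ∧ (pvAdvance occs lim j fuel < occs.length → ¬ occs.getD (pvAdvance occs lim j fuel) 0 ≤ lim) := by
  intro fuel
  induction fuel with
  | zero =>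
    intro j hj hf
    have : j = occs.length := by omega
    subst this
    rw [pvAdvance]
    exact ⟨le_refl _, le_refl _, by omega, by omega⟩
  | succ fuel ih =>
    intro j hj hf
    rw [pvAdvance]
    by_cases hc : j < occs.length ∧ occs.getD j 0 ≤ lim
    · rw [if_pos hc]
      obtain ⟨ih1, ih2, ih3, ih4⟩ := ih (j+1) (by omega) (by omega)
      refine ⟨by omega, ih2, ?_, ih4⟩
      intro k hk1 hk2
      rcases Nat.eq_or_lt_of_le hk1 with h | h
      · subst h; exact hc.2
      · exact ih3 k (by omega) hk2
    · rw [if_neg hc]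
      refine ⟨le_refl _, hj, by omega, ?_⟩
      intro hlt
      rcases Decidable.not_and_iff_or_not.mp hc with h | h
      · omega
      · exact h

-- the rfind predecessor, read off the collected occurrence prefix and the pointer
lemma pvPredOfOccs (t p : List Char) (hp : p ≠ []) (i : Int) (hi0 : 0 ≤ i)
    (hin : i ≤ (t.length : Int)) (occs : List Int) (hs : occs.Pairwise (· < ·))
    (hsub : ∀ q ∈ occs, ∃ jn : Nat, q = (jn : Int) ∧ p <+: t.drop jn)
    (hcov : ∀ jn : Nat, p <+: t.drop jn → (jn : Int) + p.length ≤ i → (jn : Int) ∈ occs)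
    (j' : Nat) (hj'le : j' ≤ occs.length)
    (hbelow : ∀ k, k < j' → occs.getD k 0 ≤ i - p.length)
    (habove : j' < occs.length → ¬ occs.getD j' 0 ≤ i - p.length) :
    PySem.Chars.rfindFrom t p 0 (some i) = if j' = 0 then -1 else occs.getD (j' - 1) 0 := by
  rcases pvRfindFrom_spec t p i hp hi0 hin with ⟨hv, hnone⟩ | ⟨jn, hv, hfit, hpre, hbig⟩
  · rw [hv]
    by_cases hz : j' = 0
    · rw [if_pos hz]
    · exfalso
      have hmem : occs.getD (j' - 1) 0 ∈ occs := by
        rw [List.getD_eq_getElem _ _ (by omega)]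
        exact List.getElem_mem _
      obtain ⟨jn, hq, hqpre⟩ := hsub _ hmem
      have hle := hbelow (j' - 1) (by omega)
      exact hnone jn (by omega) hqpre
  · rw [hv]
    have hjm : (jn : Int) ∈ occs := hcov jn hpre hfit
    obtain ⟨idx, hidx, hidxv⟩ := List.mem_iff_getElem.mp hjm
    have hidxd : occs.getD idx 0 = (jn : Int) := by
      rw [List.getD_eq_getElem _ _ hidx]; exact hidxv
    by_cases hz : j' = 0
    · exfalso
      have hlt : (0:Nat) < occs.length := by omega
      have := habove (by omega)
      rw [hz] at this
      have hle : occs.getD 0 0 ≤ occs.getD idx 0 := pvSorted_getD_le hs (by omega) hidx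
      omega
    · rw [if_neg hz]
      have h1 : occs.getD (j' - 1) 0 ≤ (jn : Int) := by
        have hmem : occs.getD (j' - 1) 0 ∈ occs := by
          rw [List.getD_eq_getElem _ _ (by omega)]
          exact List.getElem_mem _
        obtain ⟨jn', hq, hqpre⟩ := hsub _ hmem
        have hle := hbelow (j' - 1) (by omega)
        have := hbig jn' (by omega) hqpre
        omega
      have h2 : (jn : Int) ≤ occs.getD (j' - 1) 0 := by
        rcases Nat.lt_or_ge idx j' with h | h
        · rw [← hidxd]
          exact pvSorted_getD_le hs (by omega) (by omega)
        · exfalso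
          have hj'lt : j' < occs.length := by omega
          have := habove hj'lt
          have hle : occs.getD j' 0 ≤ occs.getD idx 0 := pvSorted_getD_le hs h hidx
          omega
      omega

-- B's forward DP loop computes the chain length at the final occurrence
lemma pvLoopB_spec (t p : List Char) (hp : p ≠ []) (hmn : p.length ≤ t.length)
    (hocc : p <+: t.drop (t.length - p.length)) :
    ∀ (fuel s : Nat) (occs chains : List Int) (j : Nat) (last : Int),
    s ≤ t.length → t.length + 1 - s ≤ fuel →
    occs.Pairwise (· < ·) →
    (∀ q : Int, q ∈ occs ↔ ∃ jn : Nat, q = (jn : Int) ∧ jn < s ∧ p <+: t.drop jn) →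
    chains.length = occs.length →
    (∀ k, k < occs.length → chains.getD k 0 = pvChain t p (occs.getD k 0).toNat (occs.getD k 0)) →
    j ≤ occs.length →
    (∀ k, k < j → occs.getD k 0 ≤ (s : Int) - p.length) →
    (t.length - p.length < s → last = pvChain t p (t.length - p.length) ((t.length - p.length : Nat) : Int)) →
    pvLoopB t p (p.length) (PySem.Chars.findFrom t p (s : Int) none) occs chains j last fuel
      = pvChain t p (t.length - p.length) ((t.length - p.length : Nat) : Int) := by
  have hm : 1 ≤ p.length := List.length_pos_iff.mpr hp
  intro fuel
  induction fuel with
  | zero => intro s occs chains j last hs hf _ _ _ _ _ _ _; omega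
  | succ fuel ih =>
    intro s occs chains j last hs hf hsort hmem hlen hchain hjle hjbel hlast
    by_cases hneg : PySem.Chars.findFrom t p (s : Int) none = -1
    · rw [pvLoopB, if_pos hneg]
      apply hlast
      by_contra hle
      have hsle : s ≤ t.length - p.length := by omega
      have hinf : p <:+: t.drop s := by
        have hc' : p <+: (t.drop s).drop (t.length - p.length - s) := by
          rw [List.drop_drop, show s + (t.length - p.length - s) = t.length - p.length by omega]
          exact hocc
        exact hc'.isInfix.trans (List.drop_suffix _ (t.drop s)).isInfix
      exact (PySem.Chars.findFrom_natCast_eq_neg_one_iff t p s hs).mp hneg hinf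
    · obtain ⟨hsle, hpre, hmin⟩ := PySem.Chars.findFrom_natCast_spec t p s hs hneg
      set i : Int := PySem.Chars.findFrom t p (s : Int) none with hidef
      have hi0 : 0 ≤ i := le_trans (by omega) hsle
      have hilt : i.toNat < t.length := pvOcc_lt_length hp hpre
      have hile : i.toNat + p.length ≤ t.length := pvOcc_add_le hp hpre
      rw [pvLoopB, if_neg hneg]
      simp only []
      obtain ⟨ha1, ha2, ha3, ha4⟩ :=
        pvAdvance_spec occs (i - p.length) (occs.length + 1) j hjle (by omega)
      set j' := pvAdvance occs (i - p.length) j (occs.length + 1) with hj'def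
      have hbelow : ∀ k, k < j' → occs.getD k 0 ≤ i - p.length := by
        intro k hk
        rcases Nat.lt_or_ge k j with h | h
        · have := hjbel k h
          omega
        · exact ha3 k h hk
      have hpred := pvPredOfOccs t p hp i hi0 (by omega) occs hsort
        (fun q hq => by
          obtain ⟨jn, hq1, _, hq3⟩ := (hmem q).mp hq
          exact ⟨jn, hq1, hq3⟩)
        (fun jn hjpre hjfit => (hmem _).mpr ⟨jn, rfl, by
          by_contra hge
          exact hmin jn (by omega) (by omega) hjpre, hjpre⟩)
        j' ha2 hbelow ha4
      -- the computed c equals the chain length at i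
      have hc : (if 0 < j' ∧ i - (occs.getD (j' - 1) 0 + (p.length : Int)) < p.length
            then chains.getD (j' - 1) 0 + 1 else 1) = pvChain t p i.toNat i := by
        by_cases hz : j' = 0
        · rw [if_neg (by omega)]
          rw [if_pos hz] at hpred
          cases hcase : i.toNat with
          | zero => rw [pvChain]
          | succ k =>
            rw [pvChain]
            simp [hpred]
        · rw [if_neg hz] at hpred
          have hmemq : occs.getD (j' - 1) 0 ∈ occs := by
            rw [List.getD_eq_getElem _ _ (by omega)]
            exact List.getElem_mem _
          obtain ⟨jn, hq1, hq2, hq3⟩ := (hmem _).mp hmemq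
          have hfit := hbelow (j' - 1) (by omega)
          obtain ⟨k, hk⟩ : ∃ k, i.toNat = k + 1 := ⟨i.toNat - 1, by omega⟩
          rw [hk, pvChain]
          simp only [hpred]
          rw [if_neg (by omega : ¬ occs.getD (j' - 1) 0 = -1)]
          by_cases hgap : (p.length : Int) ≤ i - (occs.getD (j' - 1) 0 + p.length)
          · rw [if_pos hgap, if_neg (by omega)]
          · rw [if_neg hgap, if_pos ⟨by omega, by omega⟩]
            have hch := hchain (j' - 1) (by omega)
            have hstab : pvChain t p k (occs.getD (j' - 1) 0)
                = pvChain t p (occs.getD (j' - 1) 0).toNat (occs.getD (j' - 1) 0) :=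
              pvChain_stable t p hp (max k (occs.getD (j' - 1) 0).toNat) _ _ _
                (by omega) (by omega) (by omega) (by omega) (by omega)
            rw [hstab, hch]
            omega
      rw [hc]
      have harg : i + 1 = ((i.toNat + 1 : Nat) : Int) := by push_cast; omega
      rw [harg]
      apply ih (i.toNat + 1) (occs ++ [i]) (chains ++ [pvChain t p i.toNat i]) j'
        (pvChain t p i.toNat i) (by omega) (by omega)
      · rw [List.pairwise_append]
        refine ⟨hsort, by simp, ?_⟩
        intro q hq q' hq'
        obtain ⟨jn, hq1, hq2, _⟩ := (hmem q).mp hq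
        rw [List.mem_singleton] at hq'
        subst hq'
        omega
      · intro q
        rw [List.mem_append, List.mem_singleton, hmem q]
        constructor
        · rintro (⟨jn, hq1, hq2, hq3⟩ | rfl)
          · exact ⟨jn, hq1, by omega, hq3⟩
          · exact ⟨i.toNat, by omega, by omega, hpre⟩
        · rintro ⟨jn, rfl, hq2, hq3⟩
          rcases Nat.lt_or_ge jn s with h | h
          · exact Or.inl ⟨jn, rfl, h, hq3⟩
          · right
            have : jn = i.toNat := by
              by_contra hne
              exact hmin jn h (by omega) hq3
            omega
      · simp [hlen]
      · intro k hk
        rw [List.length_append, List.length_singleton] at hk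
        rcases Nat.lt_or_ge k occs.length with h | h
        · rw [List.getD_append occs [i] 0 k h, List.getD_append chains _ 0 k (by omega)]
          exact hchain k h
        · have hkk : k = occs.length := by omega
          subst hkk
          have e1 : (occs ++ [i]).getD occs.length 0 = i := by simp
          have e2 : (chains ++ [pvChain t p i.toNat i]).getD occs.length 0
              = pvChain t p i.toNat i := by
            rw [← hlen]; simp
          rw [e1, e2]
      · simp only [List.length_append, List.length_singleton]; omega
      · intro k hk
        rw [List.getD_append occs [i] 0 k (by omega)]
        have := hbelow k hk
        omega
      · intro hlt
        have hieq : i.toNat = t.length - p.length := by omega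
        rw [← hieq, show ((i.toNat : Nat) : Int) = i from by omega]

-- dropping whole copies inside a repetition
lemma pvDrop_flatten_replicate (p : List Char) : ∀ (a b : Nat),
    (List.flatten (List.replicate (a + b) p)).drop (a * p.length)
      = List.flatten (List.replicate b p) := by
  intro a
  induction a with
  | zero => intro b; simp
  | succ a ih =>
    intro b
    rw [show a + 1 + b = (a + b) + 1 by omega, List.replicate_succ, List.flatten_cons,
        show (a+1) * p.length = p.length + a * p.length by ring, ← List.drop_drop,
        List.drop_left]
    exact ih b

-- inside a trailing repetition, every block boundary starts an occurrence
lemma pvRep_prefix (t p : List Char) (k j : Nat)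
    (hend : List.flatten (List.replicate k p) <:+ t) (hj : 1 ≤ j) (hjk : j ≤ k) :
    p <+: t.drop (t.length - j * p.length) := by
  obtain ⟨u, hu⟩ := hend
  have hlen : t.length = u.length + k * p.length := by
    rw [← hu]; simp [List.length_flatten]
  have hmul : j * p.length ≤ k * p.length := Nat.mul_le_mul_right _ hjk
  have hmul2 : (k - j) * p.length + j * p.length = k * p.length := by
    rw [← Nat.add_mul]; congr 1; omega
  have hdrop : t.drop (t.length - j * p.length) = List.flatten (List.replicate j p) := by
    have h1 : t.length - j * p.length = u.length + (k - j) * p.length := by omega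
    rw [h1, ← hu, ← List.drop_drop, List.drop_left]
    have h2 := pvDrop_flatten_replicate p (k - j) j
    rw [show (k - j) + j = k by omega] at h2
    exact h2
  rw [hdrop, show j = (j - 1) + 1 by omega, List.replicate_succ, List.flatten_cons]
  exact List.prefix_append p _

-- under A's exact-repetition quick-path hypothesis the backward loop reaches required_reps
lemma pvQuick (t p : List Char) (r : Int) (hp : p ≠ []) (hr : 1 ≤ r)
    (hend : List.flatten (List.replicate r.toNat p) <:+ t) :
    ∀ (fuel : Nat) (reps : Int), 1 ≤ reps → reps ≤ r → (r - reps).toNat ≤ fuel →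
    r ≤ pvLoopA t p r reps ((t.length : Int) - reps * p.length) fuel := by
  have hm : 1 ≤ p.length := List.length_pos_iff.mpr hp
  have hL : r.toNat * p.length ≤ t.length := by
    have := hend.length_le
    simpa [List.length_flatten] using this
  have hLI : r * (p.length : Int) ≤ (t.length : Int) := by
    have h := (Nat.cast_le (α := Int)).mpr hL
    push_cast at h
    rw [show ((r.toNat : Nat) : Int) = r by omega] at h
    exact h
  intro fuel
  induction fuel with
  | zero =>
    intro reps h1 h2 h3
    rw [pvLoopA]
    omega
  | succ fuel ih =>
    intro reps h1 h2 h3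
    by_cases hreq : reps = r
    · subst hreq
      rw [pvLoopA, if_neg (by omega : ¬ (reps < reps ∧ 0 < (t.length : Int) - reps * p.length))]
    · have hlt : reps < r := lt_of_le_of_ne h2 hreq
      have hA : (reps + 1) * (p.length : Int) ≤ r * p.length :=
        mul_le_mul_of_nonneg_right (by omega) (by positivity)
      have hZ : (reps + 1) * (p.length : Int) = reps * p.length + p.length := by ring
      have hpos : 0 < (t.length : Int) - reps * p.length := by omega
      have hposL : (t.length : Int) - reps * p.length ≤ (t.length : Int) := by
        have : 0 ≤ reps * (p.length : Int) := mul_nonneg (by omega) (by positivity)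
        omega
      -- the occurrence exactly one pattern-length earlier
      have hjk : reps.toNat + 1 ≤ r.toNat := by omega
      have hocc : p <+: t.drop (t.length - (reps.toNat + 1) * p.length) :=
        pvRep_prefix t p r.toNat (reps.toNat + 1) hend (by omega) hjk
      have hmulnat : (reps.toNat + 1) * p.length ≤ r.toNat * p.length :=
        Nat.mul_le_mul_right _ hjk
      have hcast : ((t.length - (reps.toNat + 1) * p.length : Nat) : Int)
          = (t.length : Int) - (reps + 1) * p.length := by
        have hsub : (reps.toNat + 1) * p.length ≤ t.length := by omega
        push_cast [Nat.cast_sub hsub]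
        rw [Int.toNat_of_nonneg (by omega : (0:Int) ≤ reps)]
      set pos : Int := (t.length : Int) - reps * p.length with hposdef
      have hfit : ((t.length - (reps.toNat + 1) * p.length : Nat) : Int) + (p.length : Int) = pos := by
        rw [hcast, hposdef]; ring
      have hprev : PySem.Chars.rfindFrom t p 0 (some pos)
          = ((t.length - (reps.toNat + 1) * p.length : Nat) : Int) := by
        rcases pvRfindFrom_spec t p pos hp (by omega) hposL with ⟨hv, hnone⟩ | ⟨jn', hv, hfit', hpre', hbig⟩
        · exact absurd hocc (hnone _ (by omega))
        · rw [hv]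
          have hge : t.length - (reps.toNat + 1) * p.length ≤ jn' :=
            hbig _ (by omega) hocc
          omega
      rw [pvLoopA, if_pos ⟨hlt, hpos⟩, hprev,
          if_neg (by omega : ¬ ((t.length - (reps.toNat + 1) * p.length : Nat) : Int) = -1),
          if_neg (by omega : ¬ (p.length : Int) ≤ pos - (((t.length - (reps.toNat + 1) * p.length : Nat) : Int) + (p.length : Int)))]
      have harg : ((t.length - (reps.toNat + 1) * p.length : Nat) : Int)
          = (t.length : Int) - (reps + 1) * p.length := hcast
      rw [harg]
      exact ih (reps + 1) (by omega) (by omega) (by omega)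

-- the two ports agree on every input
lemma pvMain_eq (text pattern : String) (required_reps : Int) :
    check_quasi_repetition_py text pattern required_reps
      = check_quasi_repetition_py_alt text pattern required_reps := by
  unfold check_quasi_repetition_py check_quasi_repetition_py_alt
  simp only []
  by_cases hm0 : ((pattern.toList.length : Int) = 0)
  · rw [if_pos hm0, if_pos hm0]
  · have hp : pattern.toList ≠ [] := by
      intro h; apply hm0; rw [h]; rfl
    have hm : 1 ≤ pattern.toList.length := List.length_pos_iff.mpr hp
    rw [if_neg hm0, if_neg hm0]
    by_cases hend : PySem.Chars.endswith text.toList pattern.toList = true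
    · rw [if_neg (show ¬¬(PySem.Chars.endswith text.toList pattern.toList = true) from fun h => h hend)]
      rw [if_neg (show ¬¬(PySem.Chars.endswith text.toList pattern.toList = true) from fun h => h hend)]
      set t := text.toList
      set p := pattern.toList
      have hsuf : p <:+ t := (PySem.Chars.endswith_iff _ _).mp hend
      have hmn : p.length ≤ t.length := hsuf.length_le
      have hocc : p <+: t.drop (t.length - p.length) := by
        obtain ⟨u, hu⟩ := hsuf
        have hul : t.length - p.length = u.length := by
          rw [← hu]; simp
        rw [hul, ← hu, List.drop_left]
      -- B's value: the chain length from the last occurrence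
      have hB : pvLoopB t p (p.length) (PySem.Chars.find t p) [] [] 0 0 (t.length + 1)
          = pvChain t p (t.length - p.length) ((t.length - p.length : Nat) : Int) := by
        have h0 : PySem.Chars.find t p = PySem.Chars.findFrom t p ((0 : Nat) : Int) none := by
          rw [Nat.cast_zero, PySem.Chars.findFrom_zero]
        rw [h0]
        apply pvLoopB_spec t p hp hmn hocc (t.length + 1) 0 [] [] 0 0 (by omega) (by omega)
          (by simp) ?_ rfl (by simp) (by simp) (by omega) (by omega)
        intro q
        simp
      have hcast : ((t.length - p.length : Nat) : Int) = (t.length : Int) - p.length := by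
        push_cast [Nat.cast_sub hmn]; ring
      rw [hcast] at hB
      rw [hB]
      have hchar := pvLoopA_char t p required_reps hp (required_reps - 1).toNat 1
        ((t.length : Int) - p.length) (le_refl 1) (by omega) (by omega) (by omega)
      have htn : ((t.length : Int) - (p.length : Int)).toNat = t.length - p.length := by omega
      rw [htn] at hchar
      set C := pvChain t p (t.length - p.length) ((t.length : Int) - (p.length : Int)) with hC
      have hC1 : 1 ≤ C := pvChain_ge_one t p _ _
      by_cases hq : PySem.Chars.endswith t (PySem.List.pyRepeat p required_reps) = true
      · rw [if_pos hq]
        symm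
        rw [decide_eq_true_eq]
        by_cases hr1 : 1 ≤ required_reps
        · have hendq : List.flatten (List.replicate required_reps.toNat p) <:+ t := by
            have := (PySem.Chars.endswith_iff _ _).mp hq
            simpa [PySem.List.pyRepeat] using this
          have h := pvQuick t p required_reps hp hr1 hendq
            (required_reps - 1).toNat 1 (le_refl 1) hr1 (by omega)
          rw [one_mul] at h
          have := hchar.mp h
          omega
        · omega
      · rw [if_neg hq]
        have hiff : (required_reps ≤ pvLoopA t p required_reps 1 ((t.length : Int) - ↑p.length)
              (required_reps - 1).toNat) ↔ (required_reps ≤ C) :=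
          ⟨fun h => by have := hchar.mp h; omega, fun h => hchar.mpr (by omega)⟩
        exact decide_eq_decide.mpr hiff
    · rw [if_pos (show ¬(PySem.Chars.endswith text.toList pattern.toList = true) from fun h => hend h)]
      rw [if_pos (show ¬(PySem.Chars.endswith text.toList pattern.toList = true) from fun h => hend h)]

-- ===== VERDICT (by name: the statement is the Claim_ definition above) =====
theorem check_quasi_repetition_py_spec : Claim_equal_check_quasi_repetition_py :=
  fun text pattern required_reps _ => pvMain_eq text pattern required_reps
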